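-- pv_equiv track=rewrite | github.com/albertoquiroga-ctrl/exchange-programming | class5_ex_dict.py | find_max_holding
-- ===== SOURCE A (Python) =====
-- def find_max_holding(portfolio):
--     """Return the ticker with the highest quantity (first occurrence on ties)."""
--     if not portfolio:
--         return None
--
--     max_ticker = None
--     max_quantity = None
--
--     for ticker, quantity in portfolio.items():
--         is_first_entry = max_quantity is None
--         is_new_max = quantity > max_quantity if max_quantity is not None else False
--
--         if is_first_entry or is_new_max:
--             max_ticker = ticker
--             max_quantity = quantity
--
--     return max_ticker
-- ===== SOURCE B (Python) =====
-- def find_max_holding(portfolio):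
--     """Return the ticker with the highest quantity (first occurrence on ties)."""
--     if not portfolio:
--         return None
--     return sorted(portfolio.items(), key=lambda kv: kv[1], reverse=True)[0][0]
-- ===== Notes on version B (the rewrite author's own statement) =====
-- stated objective: simpler
-- what changed: Replaces the manual running-max loop over Optional state with a stable reverse sort by quantity and taking the first element's ticker (stability preserves first-on-ties).
import Mathlib
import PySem

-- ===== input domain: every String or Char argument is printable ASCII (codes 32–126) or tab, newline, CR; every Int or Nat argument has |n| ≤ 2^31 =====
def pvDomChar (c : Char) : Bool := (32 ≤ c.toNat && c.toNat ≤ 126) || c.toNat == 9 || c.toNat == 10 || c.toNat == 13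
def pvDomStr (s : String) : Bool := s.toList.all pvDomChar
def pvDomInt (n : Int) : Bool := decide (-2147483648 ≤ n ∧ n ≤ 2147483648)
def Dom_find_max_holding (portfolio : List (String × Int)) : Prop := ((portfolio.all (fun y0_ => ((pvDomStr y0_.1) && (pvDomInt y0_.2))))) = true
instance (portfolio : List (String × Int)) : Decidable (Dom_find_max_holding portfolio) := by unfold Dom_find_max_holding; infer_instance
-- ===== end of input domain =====

-- B replaces A's manual running-max loop over Optional state by a stable reverse sort on quantity
-- and taking the first element's ticker; simpler, same return value (first occurrence on ties).

-- ===== PORT A =====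
def find_max_holding (portfolio : List (String × Int)) : Option String :=
  if portfolio.isEmpty then none
  else
    (portfolio.foldl (fun (st : Option String × Option Int) kv =>
        let is_first_entry := st.2.isNone
        let is_new_max := match st.2 with
          | some mq => decide (mq < kv.2)
          | none => false
        if is_first_entry || is_new_max then (some kv.1, some kv.2) else st)
      (none, none)).1

-- ===== PORT B =====
def find_max_holding_alt (portfolio : List (String × Int)) : Option String :=
  if portfolio.isEmpty then none
  else
    -- sorted(portfolio.items(), key=lambda kv: kv[1], reverse=True)[0][0]; the guard makes [0] safe
    match PySem.List.sorted portfolio (fun kv => kv.2) true with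
    | kv :: _ => some kv.1
    | [] => none

-- ===== PRECONDITION & SPEC =====
def Spec_find_max_holding (portfolio : List (String × Int)) (out : Option String) : Prop := out = find_max_holding_alt portfolio
instance (portfolio : List (String × Int)) (out : Option String) : Decidable (Spec_find_max_holding portfolio out) := by unfold Spec_find_max_holding; infer_instance

-- ===== CLAIM (what is proved, stated in full; the proofs are below) =====
def Claim_equal_find_max_holding : Prop := ∀ (portfolio : List (String × Int)), Dom_find_max_holding portfolio → Spec_find_max_holding portfolio (find_max_holding portfolio)

-- ===== LEMMAS AND PROOFS =====

/-- The plain running "first maximum" fold both sides reduce to. -/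
def pvRunMax (p : String × Int) (t : List (String × Int)) : String × Int :=
  t.foldl (fun p kv => if p.2 < kv.2 then kv else p) p

lemma pvA_fold (t : List (String × Int)) (a : String) (q : Int) :
    t.foldl (fun (st : Option String × Option Int) kv =>
        let is_first_entry := st.2.isNone
        let is_new_max := match st.2 with
          | some mq => decide (mq < kv.2)
          | none => false
        if is_first_entry || is_new_max then (some kv.1, some kv.2) else st)
      (some a, some q) = (some (pvRunMax (a, q) t).1, some (pvRunMax (a, q) t).2) := by
  induction t generalizing a q with
  | nil => rfl
  | cons kv t ih =>
    simp only [List.foldl_cons, pvRunMax, Option.isNone_some, Bool.false_or]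
    by_cases h : q < kv.2
    · simpa [h, pvRunMax] using ih kv.1 kv.2
    · simpa [h, pvRunMax] using ih a q

lemma pvInsertBy_cons (x h : String × Int) (rest : List (String × Int)) :
    PySem.List.insertBy (fun a b : String × Int => decide (b.2 < a.2)) x (h :: rest)
      = if h.2 < x.2 then x :: h :: rest
        else h :: PySem.List.insertBy (fun a b : String × Int => decide (b.2 < a.2)) x rest := by
  by_cases hc : h.2 < x.2 <;> simp [PySem.List.insertBy, hc]

lemma pvB_fold (t : List (String × Int)) (h : String × Int) (rest : List (String × Int)) :
    ∃ rest', t.foldl (fun acc x =>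
        PySem.List.insertBy (fun a b : String × Int => decide (b.2 < a.2)) x acc) (h :: rest)
      = pvRunMax h t :: rest' := by
  induction t generalizing h rest with
  | nil => exact ⟨rest, rfl⟩
  | cons kv t ih =>
    simp only [List.foldl_cons, pvInsertBy_cons, pvRunMax]
    by_cases hc : h.2 < kv.2
    · simp only [if_pos hc]
      exact ih kv (h :: rest)
    · simp only [if_neg hc]
      exact ih h _

-- ===== VERDICT (by name: the statement is the Claim_ definition above) =====
theorem find_max_holding_spec : Claim_equal_find_max_holding := by
  intro portfolio _
  unfold Spec_find_max_holding find_max_holding find_max_holding_alt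
  cases portfolio with
  | nil => rfl
  | cons p t =>
    simp only [List.isEmpty_cons, if_neg Bool.false_ne_true, List.foldl_cons,
      PySem.List.sorted_rev_eq_foldl_insertBy]
    have h1 : PySem.List.insertBy (fun a b : String × Int => decide (b.2 < a.2)) p [] = [p] := by
      simp [PySem.List.insertBy]
    obtain ⟨rest', hr⟩ := pvB_fold t p []
    rw [h1, hr]
    have := pvA_fold t p.1 p.2
    simp only [Option.isNone_none, Bool.true_or, if_pos]
    rw [show ((some p.1, some p.2) : Option String × Option Int) = (some ((p.1,p.2) : String × Int).1, some ((p.1,p.2):String × Int).2) from rfl] at this ⊢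
    rw [this]
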